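-- pv_equiv track=rewrite | github.com/monadyn/monadyn.github.io | Code/Amzn-StorageOptm.py | storage_optimization
-- ===== SOURCE A (Python) =====
-- from typing import List
--
-- def storage_optimization(n: int, m: int, h: List[int], v: List[int]) -> int:
--     # WRITE YOUR BRILLIANT CODE HERE
--     max_h = 1
--     i = 1
--     while i <= n:
--         temp = 1
--         while i in h:
--             i += 1
--             temp += 1
--         else:
--             i += 1
--         max_h = max(max_h, temp)
--
--     max_v = 1
--     i = 1
--     while i <= m:
--         temp = 1
--         while i in v:
--             i += 1
--             temp += 1
--         else:
--             i += 1
--         max_v = max(max_v, temp)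
--
--     return max_h*max_v
-- ===== SOURCE B (Python) =====
-- from typing import List
--
-- def storage_optimization(n: int, m: int, h: List[int], v: List[int]) -> int:
--     def longest(bound, xs):
--         present = set(xs)
--         best = 0
--         for x in xs:
--             if 1 <= x <= bound and (x == 1 or x - 1 not in present):
--                 length = 1
--                 while x + length in present:
--                     length += 1
--                 if length > best:
--                     best = length
--         return best + 1
--     return longest(n, h) * longest(m, v)
-- ===== Notes on version B (the rewrite author's own statement) =====
-- stated objective: faster
-- what changed: A scans every integer i in 1..n (and 1..m) doing list membership tests; B builds a set once and, for each list element that starts a consecutive run (>=1 and start <= bound), counts the run with O(1) set lookups, so the cost no longer depends on n or m.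
import Mathlib
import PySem

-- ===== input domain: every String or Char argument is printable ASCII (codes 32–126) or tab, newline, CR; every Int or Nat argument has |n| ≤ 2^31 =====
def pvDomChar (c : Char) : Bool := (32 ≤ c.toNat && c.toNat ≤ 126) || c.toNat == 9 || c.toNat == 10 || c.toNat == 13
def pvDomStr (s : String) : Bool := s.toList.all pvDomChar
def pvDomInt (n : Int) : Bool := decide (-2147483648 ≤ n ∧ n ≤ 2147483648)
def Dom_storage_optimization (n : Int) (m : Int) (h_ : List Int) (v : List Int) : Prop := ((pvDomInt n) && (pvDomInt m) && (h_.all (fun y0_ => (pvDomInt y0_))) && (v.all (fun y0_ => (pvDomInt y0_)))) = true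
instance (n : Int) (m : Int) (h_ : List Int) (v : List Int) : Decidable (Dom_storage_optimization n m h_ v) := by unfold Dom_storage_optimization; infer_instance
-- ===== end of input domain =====

-- B replaces A's scan of every integer 1..n (resp. 1..m) by the set-based longest-consecutive-run
-- scan over the list elements themselves; same return value, proved equal below.

-- termination helper for the membership-counting loops (cited by decreasing_by)
theorem pv_filter_mono (xs : List Int) (i : Int) :
    (xs.filter (fun y => decide (i + 1 ≤ y))).length ≤ (xs.filter (fun y => decide (i ≤ y))).length :=
  List.Sublist.length_le
    (List.monotone_filter_right xs (fun a ha => by simp at ha ⊢; omega))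

theorem pv_filter_lt (xs : List Int) (i : Int) (hm : i ∈ xs) :
    (xs.filter (fun y => decide (i + 1 ≤ y))).length < (xs.filter (fun y => decide (i ≤ y))).length := by
  induction xs with
  | nil => cases hm
  | cons a t ih =>
    rw [List.filter_cons, List.filter_cons]
    by_cases h1 : i + 1 ≤ a <;> by_cases h2 : i ≤ a
    · have ht : i ∈ t := by
        rcases List.mem_cons.mp hm with rfl | h
        · omega
        · exact h
      rw [if_pos (by simp only [decide_eq_true_eq]; omega),
        if_pos (by simp only [decide_eq_true_eq]; omega)]
      simpa using Nat.succ_lt_succ (ih ht)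
    · omega
    · rw [if_neg (by simp only [decide_eq_true_eq]; omega),
        if_pos (by simp only [decide_eq_true_eq]; omega)]
      have := pv_filter_mono t i
      simp only [List.length_cons]
      omega
    · have ht : i ∈ t := by
        rcases List.mem_cons.mp hm with rfl | h
        · omega
        · exact h
      rw [if_neg (by simp only [decide_eq_true_eq]; omega),
        if_neg (by simp only [decide_eq_true_eq]; omega)]
      exact ih ht

-- ===== PORT A =====
-- inner `while i in h: i += 1; temp += 1` followed by the else-branch `i += 1`;
-- returns the new i and the final temp
def soInner (xs : List Int) (i : Int) (temp : Int) : Int × Int :=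
  if h : xs.contains i then soInner xs (i + 1) (temp + 1) else (i + 1, temp)
termination_by (xs.filter (fun y => decide (i ≤ y))).length
decreasing_by exact pv_filter_lt xs i (by simpa using h)

-- needed by soOuter's termination proof
theorem soInner_fst_gt (xs : List Int) (i temp : Int) : i < (soInner xs i temp).1 := by
  induction i, temp using soInner.induct xs with
  | case1 i temp hc ih => rw [soInner, dif_pos hc]; omega
  | case2 i temp hc => rw [soInner, dif_neg hc]; omega

-- outer `while i <= n:` loop of A
def soOuter (bound : Int) (xs : List Int) (i maxv : Int) : Int :=
  if i ≤ bound then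
    let p := soInner xs i 1
    soOuter bound xs p.1 (max maxv p.2)
  else maxv
termination_by (bound + 1 - i).toNat
decreasing_by have := soInner_fst_gt xs i 1; omega

def storage_optimization (n : Int) (m : Int) (h_ : List Int) (v : List Int) : Int :=
  soOuter n h_ 1 1 * soOuter m v 1 1

-- ===== PORT B =====
-- `length = 1; while x + length in present: length += 1` — returns the final length
def altChain (present : List Int) (x length : Int) : Int :=
  if h : PySem.Set.contains present (x + length) then altChain present x (length + 1) else length
termination_by (present.filter (fun y => decide (x + length ≤ y))).length
decreasing_by
  have hm : x + length ∈ present := by simpa [PySem.Set.contains] using h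
  have h2 := pv_filter_lt present (x + length) hm
  have he : x + (length + 1) = x + length + 1 := by ring
  simp only [he]
  exact h2

def altLongest (bound : Int) (xs : List Int) : Int :=
  let present := PySem.Set.ofList xs
  let best := xs.foldl (fun best x =>
    if 1 ≤ x ∧ x ≤ bound ∧ (x = 1 ∨ ¬ PySem.Set.contains present (x - 1)) then
      let length := altChain present x 1
      if best < length then length else best
    else best) 0
  best + 1

def storage_optimization_alt (n : Int) (m : Int) (h_ : List Int) (v : List Int) : Int :=
  altLongest n h_ * altLongest m v

-- ===== PRECONDITION & SPEC =====
def Spec_storage_optimization (n : Int) (m : Int) (h_ : List Int) (v : List Int) (out : Int) : Prop := out = storage_optimization_alt n m h_ v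
instance (n : Int) (m : Int) (h_ : List Int) (v : List Int) (out : Int) : Decidable (Spec_storage_optimization n m h_ v out) := by unfold Spec_storage_optimization; infer_instance

-- ===== CLAIM (what is proved, stated in full; the proofs are below) =====
def Claim_equal_storage_optimization : Prop := ∀ (n : Int) (m : Int) (h_ : List Int) (v : List Int), Dom_storage_optimization n m h_ v → Spec_storage_optimization n m h_ v (storage_optimization n m h_ v)

-- ===== LEMMAS AND PROOFS =====

-- Cnt xs x = number of consecutive integers x, x+1, … all present in xs
def Cnt (xs : List Int) (x : Int) : Int :=
  if h : xs.contains x then Cnt xs (x + 1) + 1 else 0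
termination_by (xs.filter (fun y => decide (x ≤ y))).length
decreasing_by exact pv_filter_lt xs x (by simpa using h)

theorem Cnt_of_mem (xs : List Int) (x : Int) (h : x ∈ xs) : Cnt xs x = Cnt xs (x + 1) + 1 := by
  rw [Cnt, dif_pos (by simpa using h)]

theorem Cnt_of_not_mem (xs : List Int) (x : Int) (h : x ∉ xs) : Cnt xs x = 0 := by
  rw [Cnt, dif_neg (by simpa using h)]

theorem Cnt_nonneg (xs : List Int) (x : Int) : 0 ≤ Cnt xs x := by
  induction x using Cnt.induct xs with
  | case1 x hc ih => rw [Cnt, dif_pos hc]; omega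
  | case2 x hc => rw [Cnt, dif_neg hc]

theorem Cnt_congr (a b : List Int) (hs : ∀ y : Int, y ∈ a ↔ y ∈ b) (x : Int) : Cnt a x = Cnt b x := by
  induction x using Cnt.induct a with
  | case1 x hc ih =>
    have hma : x ∈ a := by simpa using hc
    have hmb : x ∈ b := (hs x).mp hma
    rw [Cnt_of_mem a x hma, Cnt_of_mem b x hmb, ih]
  | case2 x hc =>
    have hma : x ∉ a := by simpa using hc
    have hmb : x ∉ b := fun h => hma ((hs x).mpr h)
    rw [Cnt_of_not_mem a x hma, Cnt_of_not_mem b x hmb]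

theorem soInner_eq (xs : List Int) (i temp : Int) :
    soInner xs i temp = (i + Cnt xs i + 1, temp + Cnt xs i) := by
  induction i, temp using soInner.induct xs with
  | case1 i temp hc ih =>
    have hm : i ∈ xs := by simpa using hc
    rw [soInner, dif_pos hc, ih, Cnt_of_mem xs i hm]
    simp only [Prod.mk.injEq]
    omega
  | case2 i temp hc =>
    have hm : i ∉ xs := by simpa using hc
    rw [soInner, dif_neg hc, Cnt_of_not_mem xs i hm]
    simp only [Prod.mk.injEq]
    omega

-- Imax xs i n = max of Cnt xs x over the integer interval [i, n] (0 if empty)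
def Imax (xs : List Int) (i n : Int) : Int :=
  if i ≤ n then max (Cnt xs i) (Imax xs (i + 1) n) else 0
termination_by (n + 1 - i).toNat
decreasing_by omega

theorem Imax_nonneg (xs : List Int) (i n : Int) : 0 ≤ Imax xs i n := by
  induction i using Imax.induct n with
  | case1 i hle ih => rw [Imax, if_pos hle]; have := Cnt_nonneg xs i; omega
  | case2 i hle => rw [Imax, if_neg hle]

theorem Cnt_le_Imax (xs : List Int) (i n x : Int) :
    i ≤ x → x ≤ n → Cnt xs x ≤ Imax xs i n := by
  induction i using Imax.induct n with
  | case1 i hle ih =>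
    intro hi hx
    rw [Imax, if_pos hle]
    by_cases hix : i = x
    · subst hix; omega
    · have := ih (by omega) hx; omega
  | case2 i hle => intro hi hx; omega

theorem Imax_le (xs : List Int) (i n B : Int) (hB : 0 ≤ B)
    (hall : ∀ y : Int, i ≤ y → y ≤ n → Cnt xs y ≤ B) : Imax xs i n ≤ B := by
  induction i using Imax.induct n with
  | case1 i hle ih =>
    rw [Imax, if_pos hle]
    have h1 := hall i le_rfl hle
    have h2 := ih (fun y hy hyn => hall y (by omega) hyn)
    omega
  | case2 i hle => rw [Imax, if_neg hle]; exact hB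

theorem Imax_skip (xs : List Int) (n : Int) :
    ∀ k (i : Int), (Cnt xs i).toNat = k → i ≤ n →
      Imax xs i n = max (Cnt xs i) (Imax xs (i + Cnt xs i + 1) n) := by
  intro k
  induction k using Nat.strong_induction_on with
  | _ k ih =>
    intro i hk hin
    have hL : Imax xs i n = max (Cnt xs i) (Imax xs (i + 1) n) := by rw [Imax, if_pos hin]
    by_cases hm : i ∈ xs
    · have hcnt := Cnt_of_mem xs i hm
      have hnn := Cnt_nonneg xs (i + 1)
      by_cases hi1 : i + 1 ≤ n
      · have ih1 := ih (Cnt xs (i + 1)).toNat (by omega) (i + 1) rfl hi1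
        have he : i + 1 + Cnt xs (i + 1) + 1 = i + Cnt xs i + 1 := by omega
        rw [he] at ih1
        rw [hL, ih1]
        omega
      · have h0 : Imax xs (i + 1) n = 0 := by rw [Imax, if_neg hi1]
        have h0' : Imax xs (i + Cnt xs i + 1) n = 0 := by
          rw [Imax, if_neg (by omega)]
        rw [hL, h0, h0']
    · have hcnt := Cnt_of_not_mem xs i hm
      have h1 : Imax xs (i + Cnt xs i + 1) n = Imax xs (i + 1) n := by
        rw [hcnt]; ring_nf
      rw [hL, h1, hcnt]

theorem soOuter_eq (xs : List Int) (n : Int) :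
    ∀ k (i maxv : Int), (n + 1 - i).toNat = k → i ≤ n →
      soOuter n xs i maxv = max maxv (1 + Imax xs i n) := by
  intro k
  induction k using Nat.strong_induction_on with
  | _ k ih =>
    intro i maxv hk hin
    have hnn := Cnt_nonneg xs i
    rw [soOuter, if_pos hin]
    simp only [soInner_eq]
    have hskip := Imax_skip xs n (Cnt xs i).toNat i rfl hin
    by_cases hi' : i + Cnt xs i + 1 ≤ n
    · have hrec := ih (n + 1 - (i + Cnt xs i + 1)).toNat (by omega) (i + Cnt xs i + 1)
        (max maxv (1 + Cnt xs i)) rfl hi'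
      rw [hrec, hskip]
      omega
    · rw [soOuter, if_neg hi']
      have h0 : Imax xs (i + Cnt xs i + 1) n = 0 := by rw [Imax, if_neg hi']
      rw [hskip, h0]
      omega

theorem soOuter_val (xs : List Int) (n : Int) :
    soOuter n xs 1 1 = if 1 ≤ n then 1 + Imax xs 1 n else 1 := by
  by_cases hn : 1 ≤ n
  · have h1 := soOuter_eq xs n (n + 1 - 1).toNat 1 1 rfl hn
    have h2 := Imax_nonneg xs 1 n
    simp only [hn, if_true]
    omega
  · rw [soOuter, if_neg hn]; simp [hn]

-- ---- B side ----

theorem altChain_eq (p : List Int) (x l : Int) : altChain p x l = l + Cnt p (x + l) := by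
  induction l using altChain.induct p x with
  | case1 l hc ih =>
    have hm : x + l ∈ p := by simpa [PySem.Set.contains] using hc
    rw [altChain, dif_pos hc, ih, show x + (l + 1) = x + l + 1 from by ring,
      Cnt_of_mem p _ hm]
    ring
  | case2 l hc =>
    have hm : x + l ∉ p := by simpa [PySem.Set.contains] using hc
    rw [altChain, dif_neg hc, Cnt_of_not_mem p _ hm]
    ring

-- proof-side name for B's fold step (altLongest's fold is definitionally this)
def bstep (bound : Int) (xs : List Int) (best x : Int) : Int :=
  if 1 ≤ x ∧ x ≤ bound ∧ (x = 1 ∨ ¬ PySem.Set.contains (PySem.Set.ofList xs) (x - 1)) then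
    (if best < altChain (PySem.Set.ofList xs) x 1 then altChain (PySem.Set.ofList xs) x 1 else best)
  else best

theorem bfold_ge_init (bound : Int) (xs : List Int) (l : List Int) :
    ∀ b : Int, b ≤ l.foldl (bstep bound xs) b := by
  induction l with
  | nil => intro b; simp
  | cons a t ih =>
    intro b
    simp only [List.foldl_cons]
    have step : b ≤ bstep bound xs b a := by
      unfold bstep; split_ifs <;> omega
    exact le_trans step (ih _)

theorem bfold_ge_elem (bound : Int) (xs : List Int) (l : List Int) :
    ∀ (b x : Int), x ∈ l →
      (1 ≤ x ∧ x ≤ bound ∧ (x = 1 ∨ ¬ PySem.Set.contains (PySem.Set.ofList xs) (x - 1))) →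
      altChain (PySem.Set.ofList xs) x 1 ≤ l.foldl (bstep bound xs) b := by
  induction l with
  | nil => intro _ _ h; cases h
  | cons a t ih =>
    intro b x hx hp
    simp only [List.foldl_cons]
    rcases List.mem_cons.mp hx with rfl | hxt
    · have step : altChain (PySem.Set.ofList xs) x 1 ≤ bstep bound xs b x := by
        unfold bstep
        rw [if_pos hp]
        split_ifs <;> omega
      exact le_trans step (bfold_ge_init bound xs t _)
    · exact ih _ x hxt hp

theorem bfold_cases (bound : Int) (xs : List Int) (l : List Int) :
    ∀ b : Int, l.foldl (bstep bound xs) b = b ∨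
      ∃ x ∈ l, (1 ≤ x ∧ x ≤ bound ∧ (x = 1 ∨ ¬ PySem.Set.contains (PySem.Set.ofList xs) (x - 1))) ∧
        l.foldl (bstep bound xs) b = altChain (PySem.Set.ofList xs) x 1 := by
  induction l with
  | nil => intro b; left; simp
  | cons a t ih =>
    intro b
    simp only [List.foldl_cons]
    by_cases hp : (1 ≤ a ∧ a ≤ bound ∧ (a = 1 ∨ ¬ PySem.Set.contains (PySem.Set.ofList xs) (a - 1)))
    · by_cases hlt : b < altChain (PySem.Set.ofList xs) a 1
      · have hs : bstep bound xs b a = altChain (PySem.Set.ofList xs) a 1 := by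
          unfold bstep; rw [if_pos hp, if_pos hlt]
        rw [hs]
        rcases ih (altChain (PySem.Set.ofList xs) a 1) with h | ⟨x, hx, hpx, hfx⟩
        · right; exact ⟨a, List.mem_cons_self .., hp, h⟩
        · right; exact ⟨x, List.mem_cons_of_mem _ hx, hpx, hfx⟩
      · have hs : bstep bound xs b a = b := by
          unfold bstep; rw [if_pos hp, if_neg hlt]
        rw [hs]
        rcases ih b with h | ⟨x, hx, hpx, hfx⟩
        · left; exact h
        · right; exact ⟨x, List.mem_cons_of_mem _ hx, hpx, hfx⟩
    · have hs : bstep bound xs b a = b := by unfold bstep; rw [if_neg hp]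
      rw [hs]
      rcases ih b with h | ⟨x, hx, hpx, hfx⟩
      · left; exact h
      · right; exact ⟨x, List.mem_cons_of_mem _ hx, hpx, hfx⟩

theorem Cnt_ofList (xs : List Int) (x : Int) : Cnt (PySem.Set.ofList xs) x = Cnt xs x :=
  Cnt_congr _ _ (fun y => PySem.Set.mem_ofList xs y) x

theorem contains_ofList_iff (xs : List Int) (z : Int) :
    PySem.Set.contains (PySem.Set.ofList xs) z = true ↔ z ∈ xs := by
  simp [PySem.Set.contains, PySem.Set.mem_ofList]

theorem altLongest_val (bound : Int) (xs : List Int) :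
    altLongest bound xs = if 1 ≤ bound then 1 + Imax xs 1 bound else 1 := by
  have hfold : altLongest bound xs = xs.foldl (bstep bound xs) 0 + 1 := rfl
  have hchain : ∀ x : Int, x ∈ xs → altChain (PySem.Set.ofList xs) x 1 = Cnt xs x := by
    intro x hx
    rw [altChain_eq, Cnt_ofList, Cnt_of_mem xs x hx]
    omega
  by_cases hb : 1 ≤ bound
  · have hge0 : (0 : Int) ≤ xs.foldl (bstep bound xs) 0 := bfold_ge_init bound xs xs 0
    have hub : xs.foldl (bstep bound xs) 0 ≤ Imax xs 1 bound := by
      rcases bfold_cases bound xs xs 0 with h | ⟨x, hx, hpx, hfx⟩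
      · rw [h]; exact Imax_nonneg xs 1 bound
      · rw [hfx, hchain x hx]
        exact Cnt_le_Imax xs 1 bound x hpx.1 hpx.2.1
    have hdom : ∀ k (y : Int), y.toNat = k → 1 ≤ y → y ≤ bound →
        Cnt xs y ≤ xs.foldl (bstep bound xs) 0 := by
      intro k
      induction k using Nat.strong_induction_on with
      | _ k ih =>
        intro y hk h1y hyb
        by_cases hy : y ∈ xs
        · by_cases hst : y = 1 ∨ y - 1 ∉ xs
          · have hpy : (1 ≤ y ∧ y ≤ bound ∧
                (y = 1 ∨ ¬ PySem.Set.contains (PySem.Set.ofList xs) (y - 1))) := by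
              refine ⟨h1y, hyb, ?_⟩
              rcases hst with h | h
              · exact Or.inl h
              · exact Or.inr (fun hc => h ((contains_ofList_iff xs (y - 1)).mp hc))
            have hle := bfold_ge_elem bound xs xs 0 y hy hpy
            rw [hchain y hy] at hle
            exact hle
          · rw [not_or, not_not] at hst
            have h2y : 2 ≤ y := by
              rcases hst with ⟨hne, _⟩; omega
            have hC : Cnt xs (y - 1) = Cnt xs y + 1 := by
              have := Cnt_of_mem xs (y - 1) hst.2
              have he : y - 1 + 1 = y := by ring
              rw [he] at this
              exact this
            have hrec := ih (y - 1).toNat (by omega) (y - 1) rfl (by omega) (by omega)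
            omega
        · have h0 := Cnt_of_not_mem xs y hy
          omega
    have hlb : Imax xs 1 bound ≤ xs.foldl (bstep bound xs) 0 :=
      Imax_le xs 1 bound _ hge0 (fun y hy hyb => hdom y.toNat y rfl hy hyb)
    rw [hfold, if_pos hb]
    omega
  · have h0 : xs.foldl (bstep bound xs) 0 = 0 := by
      rcases bfold_cases bound xs xs 0 with h | ⟨x, _, hpx, _⟩
      · exact h
      · exfalso; omega
    rw [hfold, h0, if_neg hb]
    omega

theorem storage_optimization_eq (n m : Int) (h_ v : List Int) :
    storage_optimization n m h_ v = storage_optimization_alt n m h_ v := by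
  rw [storage_optimization, storage_optimization_alt, soOuter_val, soOuter_val,
    altLongest_val, altLongest_val]

-- ===== VERDICT (by name: the statement is the Claim_ definition above) =====
theorem storage_optimization_spec : Claim_equal_storage_optimization := by
  intro n m h_ v _
  unfold Spec_storage_optimization
  exact storage_optimization_eq n m h_ v
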